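-- pv_equiv track=rewrite | github.com/Pova/Advent-of-Code-2024 | solutions/day_09.py | check_spaces
-- ===== SOURCE A (Python) =====
-- def check_spaces(individual_blocks):
--
--     i = 0
--     output_list = []
--
--     while i < len(individual_blocks):
--
--         if individual_blocks[i] == []:
--             i += 1
--             continue
--
--         if set(individual_blocks[i]) != {'.'}:
--             output_list.append(individual_blocks[i])
--             i += 1
--
--         else:
--             total_lengths = len(individual_blocks[i])
--             j = i+1
--
--             while j < len(individual_blocks) and set(individual_blocks[j]) == {'.'}:
--                 total_lengths += len(individual_blocks[j])
--                 j += 1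
--
--             output_list.append(['.']*total_lengths)
--             i = j
--
--     return output_list
-- ===== SOURCE B (Python) =====
-- def check_spaces(individual_blocks):
--     # Single forward pass with a dot-run accumulator instead of an index + inner lookahead loop.
--     output_list = []
--     run = 0
--     for block in individual_blocks:
--         if not block:
--             if run:
--                 output_list.append(['.'] * run)
--                 run = 0
--             continue
--         if set(block) == {'.'}:
--             run += len(block)
--         else:
--             if run:
--                 output_list.append(['.'] * run)
--                 run = 0
--             output_list.append(block)
--     if run:
--         output_list.append(['.'] * run)
--     return output_list
-- ===== Notes on version B (the rewrite author's own statement) =====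
-- stated objective: simpler
-- what changed: Replaces the index-based while loop with an inner lookahead loop by a single for-loop carrying a dot-run-length accumulator that is flushed on empty blocks, non-dot blocks and at the end.
import Mathlib
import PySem

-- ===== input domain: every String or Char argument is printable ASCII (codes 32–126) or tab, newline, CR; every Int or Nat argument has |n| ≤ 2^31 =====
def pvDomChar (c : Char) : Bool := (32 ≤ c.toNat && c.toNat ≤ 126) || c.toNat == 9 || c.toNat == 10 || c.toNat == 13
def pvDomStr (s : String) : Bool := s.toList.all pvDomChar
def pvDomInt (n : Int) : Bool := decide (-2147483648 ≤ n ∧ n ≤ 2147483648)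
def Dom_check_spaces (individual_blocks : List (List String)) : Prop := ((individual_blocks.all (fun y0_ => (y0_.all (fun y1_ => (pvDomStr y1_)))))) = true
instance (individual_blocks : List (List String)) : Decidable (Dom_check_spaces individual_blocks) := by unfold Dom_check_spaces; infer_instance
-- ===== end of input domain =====

-- B replaces A's index-walking while loop with inner lookahead by one forward pass
-- carrying a dot-run accumulator (objective: simpler).

-- ===== PORT A =====
-- shared helper: Python's `set(block) == {'.'}` in both sources (exact: PySem.Set.equal)
def isDots (b : List String) : Bool := PySem.Set.equal (PySem.Set.ofList b) (PySem.Set.ofList ["."])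

-- A's inner lookahead while loop: returns (total_lengths, j)
def innerA (blocks : List (List String)) (j : Nat) (total : Nat) : Nat × Nat :=
  if h : j < blocks.length then
    if isDots blocks[j] then innerA blocks (j + 1) (total + blocks[j].length)
    else (total, j)
  else (total, j)
termination_by blocks.length - j

-- needed for termination of the outer loop (i = j advances)
theorem innerA_ge (blocks : List (List String)) (j total : Nat) :
    j ≤ (innerA blocks j total).2 := by
  unfold innerA
  split
  · split
    · exact le_trans (Nat.le_succ j) (innerA_ge blocks (j + 1) _)
    · simp
  · simp
termination_by blocks.length - j

-- A's outer while loop over index i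
def check_spaces_go (blocks : List (List String)) (i : Nat) : List (List String) :=
  if h : i < blocks.length then
    if blocks[i] = [] then check_spaces_go blocks (i + 1)
    else if !(isDots blocks[i]) then blocks[i] :: check_spaces_go blocks (i + 1)
    else
      let r := innerA blocks (i + 1) (blocks[i].length)
      List.replicate r.1 "." :: check_spaces_go blocks r.2
  else []
termination_by blocks.length - i
decreasing_by
  · omega
  · omega
  · have := innerA_ge blocks (i + 1) (blocks[i].length)
    omega

def check_spaces (individual_blocks : List (List String)) : List (List String) :=
  check_spaces_go individual_blocks 0

-- ===== PORT B =====
-- B's for loop with the dot-run accumulator `run`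
def altGo : List (List String) → Nat → List (List String)
  | [], run => if run ≠ 0 then [List.replicate run "."] else []
  | b :: rest, run =>
    if b = [] then
      if run ≠ 0 then List.replicate run "." :: altGo rest 0 else altGo rest 0
    else if isDots b then altGo rest (run + b.length)
    else if run ≠ 0 then List.replicate run "." :: b :: altGo rest 0
    else b :: altGo rest 0

def check_spaces_alt (individual_blocks : List (List String)) : List (List String) :=
  altGo individual_blocks 0

-- ===== PRECONDITION & SPEC =====
def Spec_check_spaces (individual_blocks : List (List String)) (out : List (List String)) : Prop := out = check_spaces_alt individual_blocks
instance (individual_blocks : List (List String)) (out : List (List String)) : Decidable (Spec_check_spaces individual_blocks out) := by unfold Spec_check_spaces; infer_instance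

-- ===== CLAIM (what is proved, stated in full; the proofs are below) =====
def Claim_equal_check_spaces : Prop := ∀ (individual_blocks : List (List String)), Dom_check_spaces individual_blocks → Spec_check_spaces individual_blocks (check_spaces individual_blocks)

-- ===== LEMMAS AND PROOFS =====

theorem isDots_nil : isDots [] = false := by decide

theorem ne_nil_of_isDots {b : List String} (h : isDots b = true) : b ≠ [] := by
  intro hn; subst hn; simp [isDots_nil] at h

-- while A's inner loop runs, B keeps accumulating `run`; when it stops, B flushes
theorem altGo_run (blocks : List (List String)) (j run : Nat) (hr : run ≠ 0) :
    altGo (blocks.drop j) run =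
      List.replicate (innerA blocks j run).1 "." :: altGo (blocks.drop (innerA blocks j run).2) 0 := by
  by_cases h : j < blocks.length
  · have hd : blocks.drop j = blocks[j] :: blocks.drop (j + 1) := List.drop_eq_getElem_cons h
    by_cases hdots : isDots blocks[j] = true
    · have hne : blocks[j] ≠ [] := ne_nil_of_isDots hdots
      have hlen : blocks[j].length ≠ 0 := fun hc => hne (List.eq_nil_of_length_eq_zero hc)
      rw [hd]
      rw [show innerA blocks j run = innerA blocks (j + 1) (run + blocks[j].length) by
        rw [innerA]; simp [h, hdots]]
      rw [show altGo (blocks[j] :: blocks.drop (j + 1)) run = altGo (blocks.drop (j + 1)) (run + blocks[j].length) by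
        simp [altGo, hne, hdots]]
      exact altGo_run blocks (j + 1) (run + blocks[j].length) (by omega)
    · have hstop : innerA blocks j run = (run, j) := by rw [innerA]; simp [h, hdots]
      rw [hstop]
      by_cases hne : blocks[j] = []
      · rw [hd]; simp [altGo, hne, hr]
      · rw [hd]; simp [altGo, hne, hdots, hr]
  · have hd : blocks.drop j = [] := List.drop_eq_nil_of_le (by omega)
    have hstop : innerA blocks j run = (run, j) := by rw [innerA]; simp [h]
    rw [hstop, hd]
    simp [altGo, hr]
termination_by blocks.length - j
decreasing_by omega

theorem go_eq_altGo (blocks : List (List String)) (i : Nat) :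
    check_spaces_go blocks i = altGo (blocks.drop i) 0 := by
  by_cases h : i < blocks.length
  · have hd : blocks.drop i = blocks[i] :: blocks.drop (i + 1) := List.drop_eq_getElem_cons h
    by_cases hne : blocks[i] = []
    · rw [check_spaces_go]; simp only [h, dif_pos, hne, if_pos]
      rw [hd, hne, show altGo (([] : List String) :: blocks.drop (i + 1)) 0 = altGo (blocks.drop (i + 1)) 0 from by
        simp [altGo]]
      exact go_eq_altGo blocks (i + 1)
    · by_cases hdots : isDots blocks[i] = true
      · have hlen : blocks[i].length ≠ 0 := fun hc => hne (List.eq_nil_of_length_eq_zero hc)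
        rw [check_spaces_go]; simp only [h, dif_pos, hne, if_neg, hdots, Bool.not_true,
          Bool.false_eq_true, not_false_eq_true]
        rw [hd, show altGo (blocks[i] :: blocks.drop (i + 1)) 0 = altGo (blocks.drop (i + 1)) (0 + blocks[i].length) by
          simp [altGo, hne, hdots]]
        rw [altGo_run blocks (i + 1) (0 + blocks[i].length) (by omega)]
        rw [show (0 + blocks[i].length) = blocks[i].length from by omega]
        exact congrArg (List.cons _) (go_eq_altGo blocks (innerA blocks (i + 1) blocks[i].length).2)
      · rw [check_spaces_go]; simp only [h, dif_pos, hne, hdots]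
        rw [hd, show altGo (blocks[i] :: blocks.drop (i + 1)) 0 = blocks[i] :: altGo (blocks.drop (i + 1)) 0 by
          simp [altGo, hne, hdots]]
        exact congrArg (List.cons _) (go_eq_altGo blocks (i + 1))
  · have hd : blocks.drop i = [] := List.drop_eq_nil_of_le (by omega)
    rw [check_spaces_go, hd]; simp [h, altGo]
termination_by blocks.length - i
decreasing_by
  · omega
  · have := innerA_ge blocks (i + 1) (blocks[i].length)
    omega
  · omega

-- ===== VERDICT (by name: the statement is the Claim_ definition above) =====
theorem check_spaces_spec : Claim_equal_check_spaces := by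
  intro blocks _
  unfold Spec_check_spaces check_spaces check_spaces_alt
  simpa using go_eq_altGo blocks 0
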